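-- pv_equiv track=rewrite | github.com/MattKinnison/FFstats | old/brack.py | seeding
-- ===== SOURCE A (Python) =====
-- def seeding(num):
--
--     brack = [[1]]
--     for seed in range(2,num+1):
--         #split
--         unpaired = [game for game in brack if len(game) == 1]
--         if len(unpaired) == 0:
--              new_brack = []
--              for game in brack:
--                  new_brack.append([game[0]])
--                  new_brack.append([game[1]])
--              brack = new_brack
--         #insert
--         in_game = max([game for game in brack if len(game) == 1])
--         brack = [game if game != in_game else [in_game[0],seed] for game in brack]
--
--     return brack
-- ===== SOURCE B (Python) =====
-- def seeding(num):
--     # Closed-form bracket construction: build the standard first-slot order by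
--     # repeated doubling (O(num)), then attach partner seeds directly.
--     if num < 2:
--         return [[1]]
--     n = 1
--     order = [1]
--     while 2 * n < num:
--         order = [y for x in order for y in (x, 2 * n + 1 - x)]
--         n *= 2
--     return [[f, 2 * n + 1 - f] if 2 * n + 1 - f <= num else [f] for f in order]
-- ===== Notes on version B (the rewrite author's own statement) =====
-- stated objective: faster
-- what changed: A rebuilds and rescans the whole bracket once per seed (filter, max, full-list rewrite each iteration); B builds the bracket's first-slot order once by repeated doubling and writes each partner seed with a closed mirror formula, so no per-seed scan remains.
import Mathlib
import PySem

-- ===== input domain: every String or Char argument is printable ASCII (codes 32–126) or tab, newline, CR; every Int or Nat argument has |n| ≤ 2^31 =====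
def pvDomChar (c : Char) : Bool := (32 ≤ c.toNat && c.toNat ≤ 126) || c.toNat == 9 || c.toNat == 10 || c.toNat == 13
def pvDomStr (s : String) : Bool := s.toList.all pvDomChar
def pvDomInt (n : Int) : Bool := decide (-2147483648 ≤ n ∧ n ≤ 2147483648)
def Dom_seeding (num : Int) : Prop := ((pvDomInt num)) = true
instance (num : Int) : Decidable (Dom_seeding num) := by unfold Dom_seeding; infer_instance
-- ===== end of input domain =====

-- B replaces A's quadratic rebuild-and-scan loop over every seed by a doubling
-- construction of the bracket's first-slot order plus a direct partner formula
-- (objective: faster).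

-- ===== PORT A =====
-- one iteration of A's `for seed in range(2, num+1)` body
def seedStep (brack : List (List Int)) (seed : Int) : List (List Int) :=
  let unpaired := brack.filter (fun game => PySem.List.len game == 1)
  let brack2 :=
    if PySem.List.len unpaired == 0 then
      -- game[0] / game[1]: in A this branch only runs when every game is a pair,
      -- so the indexing never raises; the default 0 is unreachable
      brack.foldl (fun nb game =>
        nb ++ [[PySem.List.pyGetD game 0 0], [PySem.List.pyGetD game 1 0]]) []
    else brack
  -- Python's max over lists of ints: the lexicographic (List Int) order; the
  -- filtered list is never empty in A's executions, so `.getD []` is unreachable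
  let in_game := (PySem.List.max? (brack2.filter (fun game => PySem.List.len game == 1))
                    (fun y => y)).getD []
  brack2.map (fun game => if game ≠ in_game then game else [PySem.List.pyGetD in_game 0 0, seed])

def seeding (num : Int) : List (List Int) :=
  (PySem.List.pyRange 2 (num + 1) 1).foldl seedStep [[1]]

-- ===== PORT B =====
-- Source B's `while 2*n < num` loop; n stays a power of two, so the `0 < n` guard
-- (needed only for termination) is always true at the calls that occur
def growB (num : Int) (n : Nat) (order : List Int) : Nat × List Int :=
  if h : 0 < n ∧ 2 * (n : Int) < num then
    growB num (2 * n) (order.flatMap (fun x => [x, 2 * (n : Int) + 1 - x]))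
  else (n, order)
termination_by num.toNat - n
decreasing_by omega

def seeding_alt (num : Int) : List (List Int) :=
  if num < 2 then [[1]]
  else
    let p := growB num 1 [1]
    p.2.map (fun f => if 2 * (p.1 : Int) + 1 - f ≤ num then [f, 2 * (p.1 : Int) + 1 - f] else [f])

-- ===== PRECONDITION & SPEC =====
def Spec_seeding (num : Int) (out : List (List Int)) : Prop := out = seeding_alt num
instance (num : Int) (out : List (List Int)) : Decidable (Spec_seeding num out) := by unfold Spec_seeding; infer_instance

-- ===== CLAIM (what is proved, stated in full; the proofs are below) =====
def Claim_equal_seeding : Prop := ∀ (num : Int), Dom_seeding num → Spec_seeding num (seeding num)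

-- ===== LEMMAS AND PROOFS =====

-- the first-slot order of a bracket with 2^k games (1-indexed seeds)
def ordP : Nat → List Int
  | 0 => [1]
  | k + 1 => (ordP k).flatMap (fun x => [x, 2 * (2 ^ k : Int) + 1 - x])

-- A's bracket state after seeds 1..s have been placed, when 2^k < s ≤ 2^(k+1)
def st (k : Nat) (s : Int) : List (List Int) :=
  (ordP k).map (fun f =>
    if 2 * (2 ^ k : Int) + 1 - f ≤ s then [f, 2 * (2 ^ k : Int) + 1 - f] else [f])

lemma ordP_bounds (k : Nat) : ∀ f ∈ ordP k, 1 ≤ f ∧ f ≤ (2 ^ k : Int) := by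
  induction k with
  | zero => intro f hf; simp [ordP] at hf; omega
  | succ k ih =>
    intro f hf
    simp only [ordP, List.mem_flatMap] at hf
    obtain ⟨x, hx, hf⟩ := hf
    have := ih x hx
    have h2 : (2:Int) ^ k ≤ 2 ^ (k+1) := by
      have := pow_le_pow_right₀ (by norm_num : (1:Int) ≤ 2) (Nat.le_succ k); exact this
    simp at hf
    rcases hf with rfl | rfl <;> push_cast [pow_succ] at * <;> omega

lemma ordP_mem (k : Nat) : ∀ m : Int, 1 ≤ m → m ≤ (2 ^ k : Int) → m ∈ ordP k := by
  induction k with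
  | zero => intro m h1 h2; simp at h2; simp [ordP]; omega
  | succ k ih =>
    intro m h1 h2
    simp only [ordP, List.mem_flatMap]
    by_cases hm : m ≤ (2 ^ k : Int)
    · exact ⟨m, ih m h1 hm, by simp⟩
    · refine ⟨2 * (2 ^ k : Int) + 1 - m, ih _ (by push_cast [pow_succ] at h2 ⊢; omega) (by omega), ?_⟩
      simp
  
lemma singleton_lt_iff (a b : Int) : (([a] : List Int) < [b]) ↔ a < b := by
  constructor
  · intro h
    cases h with
    | rel h => exact h
    | cons h => cases h
  · exact List.Lex.rel

lemma singleton_le_iff (a b : Int) : (([a] : List Int) ≤ [b]) ↔ a ≤ b := by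
  constructor
  · intro h
    by_contra hab
    exact (not_lt.mpr h) (List.Lex.rel (by omega))
  · intro h
    refine not_lt.mp ?_
    intro hlt
    have := (singleton_lt_iff b a).mp hlt
    omega

-- Python's max over a nonempty list of singletons returns the singleton of the max
lemma max?_singletons (l : List Int) (m : Int) (hm : m ∈ l) (hmax : ∀ y ∈ l, y ≤ m) :
    PySem.List.max? (l.map (fun f => ([f] : List Int))) (fun y => y) = some ([m]) := by
  obtain ⟨g, hg⟩ : ∃ g, PySem.List.max? (l.map (fun f => ([f] : List Int))) (fun y => y) = some g := by
    cases h : PySem.List.max? (l.map (fun f => ([f] : List Int))) (fun y => y) with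
    | none =>
      rw [PySem.List.max?_eq_none_iff] at h
      simp only [List.map_eq_nil_iff] at h
      subst h
      simp at hm
    | some g => exact ⟨g, rfl⟩
  have hg' : (@PySem.List.max? (List Int) (List Int) List.instLinearOrder.toLT LinearOrder.toDecidableLT
      (l.map (fun f => ([f] : List Int))) (fun y => y)) = some g := by
    convert hg using 2
  obtain ⟨f0, hf0, rfl⟩ := List.mem_map.mp (@PySem.List.max?_mem (List Int) (List Int) List.instLinearOrder.toLT LinearOrder.toDecidableLT _ _ _ hg')
  have hmm : ([m] : List Int) ∈ l.map (fun f => ([f] : List Int)) :=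
    List.mem_map.mpr ⟨m, hm, rfl⟩
  have hle : ([m] : List Int) ≤ [f0] :=
    PySem.List.max?_isMax (key := fun y => y) hg' ([m]) hmm
  have h1 : m ≤ f0 := (singleton_le_iff m f0).mp hle
  have h2 : f0 ≤ m := hmax f0 hf0
  rw [hg]
  congr 2
  omega

lemma st_filter (k : Nat) (s : Int) :
    (st k s).filter (fun g => PySem.List.len g == 1) =
      ((ordP k).filter (fun f => decide (s < 2 * (2 ^ k : Int) + 1 - f))).map
        (fun f => ([f] : List Int)) := by
  unfold st
  rw [List.filter_map]
  have hq : (ordP k).filter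
      ((fun g => PySem.List.len g == 1) ∘
        (fun f => if 2 * (2 ^ k : Int) + 1 - f ≤ s then [f, 2 * (2 ^ k : Int) + 1 - f] else [f])) =
      (ordP k).filter (fun f => decide (s < 2 * (2 ^ k : Int) + 1 - f)) := by
    apply List.filter_congr
    intro f _
    simp only [Function.comp_apply]
    by_cases hc : 2 * (2 ^ k : Int) + 1 - f ≤ s
    · rw [if_pos hc]
      simp [PySem.List.len_eq]
      omega
    · rw [if_neg hc]
      simp [PySem.List.len_eq]
      omega
  rw [hq]
  apply List.map_congr_left
  intro f hf
  rw [List.mem_filter, decide_eq_true_eq] at hf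
  rw [if_neg (by omega)]

lemma step_lt (k : Nat) (s : Int) (h1 : (2 ^ k : Int) < s) (h2 : s < 2 * (2 ^ k : Int)) :
    seedStep (st k s) (s + 1) = st k (s + 1) := by
  have hb := ordP_bounds k
  have hmem : (2 * (2 ^ k : Int) - s) ∈ ordP k :=
    ordP_mem k _ (by omega) (by omega)
  have hmax := max?_singletons ((ordP k).filter (fun f => decide (s < 2 * (2 ^ k : Int) + 1 - f)))
    (2 * (2 ^ k : Int) - s)
    (by simp only [List.mem_filter, decide_eq_true_eq]; exact ⟨hmem, by omega⟩)
    (by intro y hy; simp only [List.mem_filter, decide_eq_true_eq] at hy; omega)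
  have hne : (((ordP k).filter (fun f => decide (s < 2 * (2 ^ k : Int) + 1 - f))).map
      (fun f => ([f] : List Int))) ≠ [] := by
    refine List.ne_nil_of_mem (a := ([2 * (2 ^ k : Int) - s] : List Int)) ?_
    exact List.mem_map.mpr ⟨_, List.mem_filter.mpr ⟨hmem, by simp only [decide_eq_true_eq]; omega⟩, rfl⟩
  unfold seedStep
  simp only [st_filter k s]
  rw [if_neg (by simpa [PySem.List.len_eq] using hne)]
  rw [st_filter k s, hmax]
  simp only [Option.getD_some]
  unfold st
  rw [List.map_map]
  apply List.map_congr_left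
  intro f hf
  obtain ⟨hf1, hf2⟩ := hb f hf
  simp only [Function.comp]
  by_cases hc : 2 * (2 ^ k : Int) + 1 - f ≤ s
  · rw [if_pos hc, if_pos (by simp), if_pos (by omega)]
  · rw [if_neg hc]
    by_cases he : f = 2 * (2 ^ k : Int) - s
    · subst he
      rw [if_neg (by simp), if_pos (by omega)]
      simp [PySem.List.pyGetD_zero_cons]
      omega
    · rw [if_pos (by simp [he]), if_neg (by omega)]

lemma step_eq (k : Nat) :
    seedStep (st k (2 * (2 ^ k : Int))) (2 * (2 ^ k : Int) + 1) = st (k + 1) (2 * (2 ^ k : Int) + 1) := by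
  have hpow : ((2 : Int) ^ (k + 1)) = 2 * 2 ^ k := by ring
  have hb := ordP_bounds k
  have hb1 := ordP_bounds (k + 1)
  -- the filtered singleton list is empty: every game is a pair
  have hfil0 : ((ordP k).filter
      (fun f => decide (2 * (2 ^ k : Int) < 2 * (2 ^ k : Int) + 1 - f))) = [] := by
    rw [List.filter_eq_nil_iff]
    intro f hf
    have := hb f hf
    simp only [decide_eq_true_eq]
    omega
  -- the split rebuild produces the singletons of ordP (k+1)
  have hsplit : (st k (2 * (2 ^ k : Int))).foldl
      (fun nb game => nb ++ [[PySem.List.pyGetD game 0 0], [PySem.List.pyGetD game 1 0]]) [] =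
      (ordP (k + 1)).map (fun x => ([x] : List Int)) := by
    rw [PySem.List.foldl_append_eq_flatMap, List.nil_append]
    unfold st
    rw [List.flatMap_map]
    show (ordP k).flatMap _ = _
    rw [ordP]
    rw [List.map_flatMap]
    apply List.flatMap_congr
    intro f hf
    have := hb f hf
    rw [if_pos (by omega)]
    simp [PySem.List.pyGetD, PySem.List.pyGet?, PySem.List.pyIdx?]
  have hmax := max?_singletons (ordP (k + 1)) (2 * (2 ^ k : Int))
    (ordP_mem (k + 1) _ (by have h0 : (0:Int) < 2 ^ k := pow_pos (by norm_num) k; omega) (le_of_eq hpow.symm))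
    (by intro y hy; have := hb1 y hy; rw [hpow] at this; omega)
  unfold seedStep
  simp only [st_filter k (2 * (2 ^ k : Int))]
  rw [hfil0]
  rw [if_pos (by simp [PySem.List.len_eq])]
  rw [hsplit]
  have hfilself : ((ordP (k + 1)).map (fun x => ([x] : List Int))).filter
      (fun game => PySem.List.len game == 1) = (ordP (k + 1)).map (fun x => ([x] : List Int)) := by
    rw [List.filter_eq_self]
    intro g hg
    obtain ⟨x, _, rfl⟩ := List.mem_map.mp hg
    simp [PySem.List.len_eq]
  rw [hfilself, hmax]
  simp only [Option.getD_some]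
  unfold st
  rw [List.map_map]
  apply List.map_congr_left
  intro f hf
  have hbf := hb1 f hf
  simp only [Function.comp]
  by_cases he : f = 2 * (2 ^ k : Int)
  · subst he
    rw [if_neg (by simp), if_pos (by rw [hpow]; omega)]
    simp [PySem.List.pyGetD_zero_cons]
    rw [hpow]
    ring
  · rw [if_pos (by simp [he]), if_neg (by rw [hpow]; omega)]

lemma pow_band_unique (a b : Nat) (s : Int) (ha1 : (2^a : Int) < s) (ha2 : s ≤ 2^(a+1))
    (hb1 : (2^b : Int) < s) (hb2 : s ≤ 2^(b+1)) : a = b := by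
  by_contra h
  rcases Nat.lt_or_ge a b with hab | hab
  · have : (2:Int) ^ (a+1) ≤ 2 ^ b := pow_le_pow_right₀ (by norm_num) hab
    omega
  · have hba : b < a := by omega
    have : (2:Int) ^ (b+1) ≤ 2 ^ a := pow_le_pow_right₀ (by norm_num) hba
    omega

lemma exists_pow (s : Int) (hs : 2 ≤ s) : ∃ k : Nat, (2^k : Int) < s ∧ s ≤ 2^(k+1) := by
  obtain ⟨m, rfl⟩ : ∃ m : Nat, s = (m : Int) + 2 := ⟨(s - 2).toNat, by omega⟩
  refine ⟨Nat.log2 (m + 1), ?_, ?_⟩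
  · have h := Nat.log2_self_le (n := m + 1) (by omega)
    have h' : ((2 : Int) ^ Nat.log2 (m + 1)) ≤ ((m + 1 : Nat) : Int) := by exact_mod_cast h
    push_cast at h'
    omega
  · have h := Nat.lt_log2_self (n := m + 1)
    have h' : ((m + 1 : Nat) : Int) < (2 : Int) ^ (Nat.log2 (m + 1) + 1) := by exact_mod_cast h
    push_cast at h'
    omega

lemma A_char (t : Nat) : ∀ k : Nat, (2^k : Int) < (t:Int) + 2 → (t:Int) + 2 ≤ 2^(k+1) →
    (PySem.List.pyRange 2 ((t:Int) + 2 + 1) 1).foldl seedStep [[1]] = st k ((t:Int) + 2) := by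
  induction t with
  | zero =>
    intro k hk1 hk2
    have hk0 : k = 0 := by
      by_contra h
      have h1 : 1 ≤ k := by omega
      have : (2:Int) ^ 1 ≤ 2 ^ k := pow_le_pow_right₀ (by norm_num) h1
      norm_num at hk1 this
      omega
    subst hk0
    norm_num
    decide
  | succ t ih =>
    intro k hk1 hk2
    have hsplit : PySem.List.pyRange 2 (((t+1:Nat):Int) + 2 + 1) 1 =
        PySem.List.pyRange 2 ((t:Int) + 2 + 1) 1 ++ [(t:Int) + 3] := by
      have e1 : ((t+1:Nat):Int) + 2 + 1 = ((t:Int) + 3) + 1 := by push_cast; ring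
      have e2 : (t:Int) + 2 + 1 = (t:Int) + 3 := by ring
      rw [e1, e2, PySem.List.pyRange_one_succ_right (by omega)]
    rw [hsplit, List.foldl_append]
    obtain ⟨k', hk'1, hk'2⟩ := exists_pow ((t:Int) + 2) (by omega)
    rw [ih k' hk'1 hk'2]
    simp only [List.foldl_cons, List.foldl_nil]
    by_cases hcase : (t:Int) + 2 < 2 ^ (k' + 1)
    · have hkk : k = k' := by
        refine pow_band_unique k k' ((t:Int) + 3) ?_ ?_ ?_ ?_
        · push_cast at hk1; omega
        · push_cast at hk2; omega
        · omega
        · omega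
      subst hkk
      have hs2 : ((t:Int) + 2) < 2 * (2 ^ k : Int) := by
        have : ((2:Int) ^ (k + 1)) = 2 * 2 ^ k := by ring
        omega
      have := step_lt k ((t:Int) + 2) hk'1 hs2
      have harg : (t:Int) + 3 = ((t:Int) + 2) + 1 := by ring
      have he : ((t+1:Nat):Int) + 2 = ((t:Int) + 2) + 1 := by push_cast; ring
      rw [harg, this, he]
    · have hse : (t:Int) + 2 = 2 * (2 ^ k' : Int) := by
        have : ((2:Int) ^ (k' + 1)) = 2 * 2 ^ k' := by ring
        omega
      have hkk : k = k' + 1 := by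
        have hp1 : (0:Int) < 2 ^ (k'+1) := pow_pos (by norm_num) _
        have hp2 : ((2:Int) ^ (k' + 1 + 1)) = 2 * 2 ^ (k'+1) := by ring
        refine pow_band_unique k (k' + 1) ((t:Int) + 3) ?_ ?_ ?_ ?_
        · push_cast at hk1; omega
        · push_cast at hk2; omega
        · have : ((2:Int) ^ (k' + 1)) = 2 * 2 ^ k' := by ring
          omega
        · have : ((2:Int) ^ (k' + 1)) = 2 * 2 ^ k' := by ring
          omega
      subst hkk
      have harg : (t:Int) + 3 = 2 * (2 ^ k' : Int) + 1 := by omega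
      rw [hse, harg, step_eq k']
      congr 1
      push_cast
      omega

lemma grow_run (num : Int) : ∀ (d j : Nat), (2^(j+d) : Int) < num → num ≤ 2^(j+d+1) →
    growB num (2^j) (ordP j) = (2^(j+d), ordP (j+d)) := by
  intro d
  induction d with
  | zero =>
    intro j h1 h2
    rw [growB, dif_neg]
    · simp
    · intro ⟨_, hlt⟩
      push_cast at hlt
      have he : ((2:Int) ^ (j + 0 + 1)) = 2 * 2 ^ j := by ring
      omega
  | succ d ih =>
    intro j h1 h2
    rw [growB, dif_pos]
    · have hn : 2 * 2 ^ j = 2 ^ (j + 1) := by ring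
      have hord : (ordP j).flatMap (fun x => [x, 2 * (((2^j : Nat) : Int)) + 1 - x]) =
          ordP (j + 1) := by
        rw [ordP]
        push_cast
        rfl
      rw [hn, hord]
      have := ih (j + 1) (by rw [show j + 1 + d = j + (d + 1) from by omega]; exact h1)
        (by rw [show j + 1 + d + 1 = j + (d + 1) + 1 from by omega]; exact h2)
      rw [this]
      rw [show j + 1 + d = j + (d + 1) from by omega]
    · constructor
      · exact pow_pos (by norm_num) j
      · have hle : ((2:Int) ^ (j + 1)) ≤ 2 ^ (j + (d + 1)) := pow_le_pow_right₀ (by norm_num) (by omega)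
        rw [Nat.cast_pow]
        push_cast
        have : ((2:Int) ^ (j + 1)) = 2 * 2 ^ j := by ring
        omega

-- ===== VERDICT (by name: the statement is the Claim_ definition above) =====
theorem seeding_spec : Claim_equal_seeding := by
  intro num _
  unfold Spec_seeding
  by_cases h2 : num < 2
  · unfold seeding seeding_alt
    rw [if_pos h2, PySem.List.pyRange_one_eq_nil (by omega)]
    rfl
  · have h2' : 2 ≤ num := by omega
    obtain ⟨k, hk1, hk2⟩ := exists_pow num h2'
    have hA : seeding num = st k num := by
      unfold seeding
      have ht : num = ((num - 2).toNat : Int) + 2 := by omega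
      rw [ht] at hk1 hk2 ⊢
      exact A_char (num - 2).toNat k hk1 hk2
    have hgrow : growB num 1 [1] = (2 ^ k, ordP k) := by
      have h0 : growB num (2 ^ 0) (ordP 0) = (2 ^ (0 + k), ordP (0 + k)) :=
        grow_run num k 0 (by rw [Nat.zero_add]; exact hk1) (by rw [Nat.zero_add]; exact hk2)
      simpa [ordP] using h0
    have hB : seeding_alt num = st k num := by
      unfold seeding_alt
      rw [if_neg (by omega)]
      rw [hgrow]
      unfold st
      apply List.map_congr_left
      intro f _
      rw [Nat.cast_pow]
      push_cast
      rfl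
    rw [hA, hB]
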